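-- pv_equiv track=rewrite | github.com/Amna-Hassan04/Advent-of-Code-2024 | Day 7/1.py | find_valid_expression
-- ===== SOURCE A (Python) =====
-- from typing import List, Tuple
-- from itertools import product
--
-- def evaluate_expression(nums: List[int], operators: List[str]) -> int:
--     """
--     Evaluate expression with left-to-right evaluation.
--     """
--     result = nums[0]
--     for i, op in enumerate(operators):
--         if op == '+':
--             result += nums[i + 1]
--         else:  # op == '*'
--             result *= nums[i + 1]
--     return result
--
-- def find_valid_expression(target: int, nums: List[int]) -> str:
--     """
--     Find and return the valid expression if it exists.
--     """
--     num_operators = len(nums) - 1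
--     for ops in product(['+', '*'], repeat=num_operators):
--         if evaluate_expression(nums, ops) == target:
--             # Construct the expression string
--             expression = str(nums[0])
--             for i, op in enumerate(ops):
--                 expression += f" {op} {nums[i + 1]}"
--             return expression
--     return ""
-- ===== SOURCE B (Python) =====
-- def find_valid_expression(target: int, nums: list) -> str:
--     """DFS over '+'/'*' choices carrying the running left-to-right value,
--     trying '+' first so the first solution matches product order."""
--     def dfs(acc, i):
--         if i == len(nums):
--             return [] if acc == target else None
--         n = nums[i]
--         r = dfs(acc + n, i + 1)
--         if r is not None:
--             return ['+'] + r
--         r = dfs(acc * n, i + 1)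
--         if r is not None:
--             return ['*'] + r
--         return None
--     ops = dfs(nums[0], 1)
--     if ops is None:
--         return ""
--     expression = str(nums[0])
--     for op, n in zip(ops, nums[1:]):
--         expression += f" {op} {n}"
--     return expression
-- ===== Notes on version B (the rewrite author's own statement) =====
-- stated objective: alternative
-- what changed: Replaces the itertools.product enumeration that re-evaluates every operator tuple from scratch with a depth-first search carrying the running left-to-right value (trying '+' before '*', so the first solution found is the same one product order yields); intended as faster (measured 4.8x at n=16) but both are exponential and time out at the largest size, so no speed is claimed.
import Mathlib
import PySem

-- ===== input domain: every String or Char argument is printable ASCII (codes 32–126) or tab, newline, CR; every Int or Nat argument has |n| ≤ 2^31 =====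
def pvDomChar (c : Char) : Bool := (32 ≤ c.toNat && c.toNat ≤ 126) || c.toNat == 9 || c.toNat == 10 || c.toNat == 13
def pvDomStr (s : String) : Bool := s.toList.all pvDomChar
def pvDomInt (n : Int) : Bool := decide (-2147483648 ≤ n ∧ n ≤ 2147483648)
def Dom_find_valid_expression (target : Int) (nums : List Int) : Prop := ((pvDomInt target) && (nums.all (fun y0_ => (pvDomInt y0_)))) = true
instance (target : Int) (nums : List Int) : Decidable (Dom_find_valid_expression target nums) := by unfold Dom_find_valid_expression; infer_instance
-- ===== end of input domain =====

-- B replaces A's enumeration of all 2^n operator tuples (re-evaluating each from scratch)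
-- by a DFS that carries the running left-to-right value, trying '+' before '*' so the first
-- solution found is the same one; objective: an alternative algorithm sharing prefix values.

-- ===== PORT A =====
-- itertools.product(['+','*'], repeat=n): first coordinate varies slowest
def prodOps : Nat → List (List String)
  | 0 => [[]]
  | n + 1 => (prodOps n).map (fun ops => "+" :: ops) ++ (prodOps n).map (fun ops => "*" :: ops)

-- evaluate_expression: left-to-right fold of ops over the remaining numbers
def applyOps : Int → List Int → List String → Int
  | acc, _, [] => acc
  | acc, n :: rest, op :: ops => applyOps (if op == "+" then acc + n else acc * n) rest ops
  | acc, [], _ :: _ => acc   -- unreachable: ops has length of the rest list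

-- the expression-string building loop (identical in both Pythons)
def mkExpr : String → List String → List Int → String
  | e, op :: ops, n :: rest => mkExpr (e ++ " " ++ op ++ " " ++ PySem.Int.toStr n) ops rest
  | e, _, _ => e

def find_valid_expression (target : Int) (nums : List Int) : String :=
  match nums with
  | [] => ""   -- Python raises ValueError here; excluded by Pre_
  | n0 :: rest =>
    match (prodOps rest.length).find? (fun ops => applyOps n0 rest ops == target) with
    | some ops => mkExpr (PySem.Int.toStr n0) ops rest
    | none => ""

-- ===== PORT B =====
-- dfs(acc, i): returns the operator list of the first solution ('+' tried first), or none
def dfsOps (target : Int) : Int → List Int → Option (List String)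
  | acc, [] => if acc == target then some [] else none
  | acc, n :: rest =>
    match dfsOps target (acc + n) rest with
    | some r => some ("+" :: r)
    | none =>
      match dfsOps target (acc * n) rest with
      | some r => some ("*" :: r)
      | none => none

def find_valid_expression_alt (target : Int) (nums : List Int) : String :=
  match nums with
  | [] => ""   -- Python raises IndexError here; excluded by Pre_
  | n0 :: rest =>
    match dfsOps target n0 rest with
    | some ops => mkExpr (PySem.Int.toStr n0) ops rest
    | none => ""

-- ===== PRECONDITION & SPEC =====
-- Pre_ excludes only nums = [], where A raises ValueError (product with repeat=-1)
def Pre_find_valid_expression (target : Int) (nums : List Int) : Prop := nums ≠ []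
instance (target : Int) (nums : List Int) : Decidable (Pre_find_valid_expression target nums) := by unfold Pre_find_valid_expression; infer_instance
def pvWitness_find_valid_expression : Int × List Int := (10, [2, 3, 4])

def Spec_find_valid_expression (target : Int) (nums : List Int) (out : String) : Prop := out = find_valid_expression_alt target nums
instance (target : Int) (nums : List Int) (out : String) : Decidable (Spec_find_valid_expression target nums out) := by unfold Spec_find_valid_expression; infer_instance

-- ===== CLAIM (what is proved, stated in full; the proofs are below) =====
def Claim_equal_find_valid_expression : Prop := ∀ (target : Int) (nums : List Int), Dom_find_valid_expression target nums → Pre_find_valid_expression target nums → Spec_find_valid_expression target nums (find_valid_expression target nums)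

-- ===== LEMMAS AND PROOFS =====

theorem dfsOps_eq_find (target : Int) : ∀ (rest : List Int) (acc : Int),
    dfsOps target acc rest
      = (prodOps rest.length).find? (fun ops => applyOps acc rest ops == target) := by
  intro rest
  induction rest with
  | nil =>
    intro acc
    simp [dfsOps, prodOps, applyOps]
  | cons n rs ih =>
    intro acc
    simp only [dfsOps, List.length_cons, prodOps, List.find?_append, List.find?_map]
    have h1 : ((fun ops => applyOps acc (n :: rs) ops == target) ∘ fun ops => "+" :: ops)
        = fun ops => applyOps (acc + n) rs ops == target := by
      funext ops; simp [applyOps]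
    have h2 : ((fun ops => applyOps acc (n :: rs) ops == target) ∘ fun ops => "*" :: ops)
        = fun ops => applyOps (acc * n) rs ops == target := by
      funext ops; simp [applyOps]
    rw [h1, h2, ← ih (acc + n), ← ih (acc * n)]
    cases dfsOps target (acc + n) rs with
    | some r => simp [Option.or]
    | none =>
      cases dfsOps target (acc * n) rs with
      | some r => simp [Option.or]
      | none => simp [Option.or]

-- ===== VERDICT (by name: the statement is the Claim_ definition above) =====
theorem find_valid_expression_spec : Claim_equal_find_valid_expression := by
  intro target nums _ hpre
  unfold Spec_find_valid_expression
  cases nums with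
  | nil => exact absurd rfl hpre
  | cons n0 rest =>
    simp only [find_valid_expression, find_valid_expression_alt, dfsOps_eq_find]
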